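-- pv_equiv track=rewrite | github.com/shafqat2013/Sarween-Python | Archive-Delete soon/old_tracking.py | _cell_labels
-- ===== SOURCE A (Python) =====
-- def _cell_labels(grid_cols, grid_rows):
--     labels = []
--     for r in range(grid_rows):
--         row = []
--         for c in range(grid_cols):
--             if c < 26:
--                 col_label = chr(ord('A') + c)
--             else:
--                 col_label = f"C{c}"
--             row.append(f"{col_label}{r+1}")
--         labels.append(row)
--     return labels  # [row][col]
-- ===== SOURCE B (Python) =====
-- def _cell_labels(grid_cols, grid_rows):
--     n = max(grid_rows, 0) * max(grid_cols, 0)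
--     flat = []
--     for i in range(n):
--         r, c = divmod(i, grid_cols)
--         flat.append((chr(ord('A') + c) if c < 26 else f"C{c}") + str(r + 1))
--     return [flat[r * grid_cols:(r + 1) * grid_cols] for r in range(grid_rows)]
-- ===== Notes on version B (the rewrite author's own statement) =====
-- stated objective: alternative
-- what changed: B replaces A's nested row/column loops by a single flat loop over range(rows*cols) that recovers (row, col) with divmod and appends every label to one flat list, then chunks that list into rows by slicing.
import Mathlib
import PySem

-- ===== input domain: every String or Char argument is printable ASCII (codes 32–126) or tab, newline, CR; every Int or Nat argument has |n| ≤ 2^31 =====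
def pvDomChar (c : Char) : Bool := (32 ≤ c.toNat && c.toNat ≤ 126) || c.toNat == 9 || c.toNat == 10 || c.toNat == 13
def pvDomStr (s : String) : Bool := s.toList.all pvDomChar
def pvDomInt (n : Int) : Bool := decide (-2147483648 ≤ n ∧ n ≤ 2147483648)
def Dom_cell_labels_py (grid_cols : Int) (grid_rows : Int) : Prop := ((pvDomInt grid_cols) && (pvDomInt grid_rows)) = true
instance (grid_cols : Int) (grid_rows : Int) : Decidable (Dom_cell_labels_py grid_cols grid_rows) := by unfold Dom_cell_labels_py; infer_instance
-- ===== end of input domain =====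

-- B builds one flat row-major list of all labels by a single divmod-indexed loop and then
-- chunks it into rows by slicing; same values as A's nested-loop construction (objective: alternative).

-- ===== PORT A =====
-- literal port of A: accumulator append inside a double range loop, branch on c < 26 inside
def cell_labels_py (grid_cols : Int) (grid_rows : Int) : List (List String) :=
  (PySem.List.pyRange 0 grid_rows).foldl (fun labels r =>
    labels ++ [(PySem.List.pyRange 0 grid_cols).foldl (fun row c =>
      row ++ [(if c < 26 then String.ofList [Char.ofNat (65 + c).toNat]
               else "C" ++ PySem.Int.toStr c) ++ PySem.Int.toStr (r + 1)]) []]) []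

-- ===== PORT B =====
-- literal port of Source B: one flat loop over range(n) with divmod(i, grid_cols), then slicing chunks.
-- divmod is ported as (floordiv, mod); exact because the loop body only runs when n > 0, i.e. grid_cols > 0.
def cell_labels_py_alt (grid_cols : Int) (grid_rows : Int) : List (List String) :=
  let n := max grid_rows 0 * max grid_cols 0
  let flat := (PySem.List.pyRange 0 n).foldl (fun flat i =>
    let r := PySem.Int.floordiv i grid_cols
    let c := PySem.Int.mod i grid_cols
    flat ++ [(if c < 26 then String.ofList [Char.ofNat (65 + c).toNat]
              else "C" ++ PySem.Int.toStr c) ++ PySem.Int.toStr (r + 1)]) []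
  (PySem.List.pyRange 0 grid_rows).map (fun r =>
    PySem.List.slice flat (some (r * grid_cols)) (some ((r + 1) * grid_cols)))

-- ===== PRECONDITION & SPEC =====
def Spec_cell_labels_py (grid_cols : Int) (grid_rows : Int) (out : List (List String)) : Prop := out = cell_labels_py_alt grid_cols grid_rows
instance (grid_cols : Int) (grid_rows : Int) (out : List (List String)) : Decidable (Spec_cell_labels_py grid_cols grid_rows out) := by unfold Spec_cell_labels_py; infer_instance

-- ===== CLAIM (what is proved, stated in full; the proofs are below) =====
def Claim_equal_cell_labels_py : Prop := ∀ (grid_cols : Int) (grid_rows : Int), Dom_cell_labels_py grid_cols grid_rows → Spec_cell_labels_py grid_cols grid_rows (cell_labels_py grid_cols grid_rows)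

-- ===== LEMMAS AND PROOFS =====

-- chunking a mapped range: drop/take picks out one block
theorem pv_chunk {α : Type} (f : Nat → α) (a b n : Nat) (h : a + b ≤ n) :
    (((List.range n).map f).drop a).take b = (List.range b).map (fun j => f (a + j)) := by
  apply List.ext_getElem
  · simp; omega
  · intro i h1 h2
    simp only [List.getElem_take, List.getElem_drop, List.getElem_map, List.getElem_range]

theorem cell_labels_py_eq (grid_cols grid_rows : Int) :
    cell_labels_py grid_cols grid_rows = cell_labels_py_alt grid_cols grid_rows := by
  unfold cell_labels_py cell_labels_py_alt
  simp only [PySem.List.foldl_append_singleton_eq_map, List.nil_append]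
  by_cases hr : grid_rows ≤ 0
  · simp [PySem.List.pyRange_one_eq_nil hr]
  · rw [not_le] at hr
    by_cases hc : grid_cols ≤ 0
    · -- empty rows on both sides: range over cols is empty, flat is empty, every slice is []
      have hn : max grid_rows 0 * max grid_cols 0 = 0 := by
        rw [max_eq_right hc, mul_zero]
      simp [hn, PySem.List.pyRange_one_eq_nil hc, PySem.List.pyRange_one_eq_nil (le_refl (0:Int)),
        PySem.List.slice]
    · rw [not_le] at hc
      -- main case: grid_cols > 0, grid_rows > 0
      obtain ⟨R, hR⟩ : ∃ R : Nat, grid_rows = (R : Int) := ⟨grid_rows.toNat, by omega⟩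
      obtain ⟨G, hG⟩ : ∃ G : Nat, grid_cols = (G : Int) := ⟨grid_cols.toNat, by omega⟩
      have hG0 : 0 < G := by omega
      subst hR hG
      have hn : max (R : Int) 0 * max (G : Int) 0 = ((R * G : Nat) : Int) := by
        push_cast; rw [max_eq_left (by positivity), max_eq_left (by positivity)]
      rw [hn]
      simp only [PySem.List.pyRange_zero_natCast, List.map_map]
      apply List.ext_getElem
      · simp
      · intro i hi1 hi2
        simp only [List.getElem_map, List.getElem_range, Function.comp]
        have hcast : ((i : Int) * G) = ((i * G : Nat) : Int) := by push_cast; ring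
        have hcast2 : (((i : Int) + 1) * G) = ((i * G : Nat) : Int) + ((G : Nat) : Int) := by
          push_cast; ring
        rw [hcast, hcast2, PySem.List.slice_natCast_add,
          pv_chunk _ _ _ _ (by simp at hi1; nlinarith)]
        apply List.map_congr_left
        intro j hj
        simp only [List.mem_range] at hj
        simp only [Function.comp_apply]
        have hmod : PySem.Int.mod ((i * G + j : Nat) : Int) (G : Int) = ((j : Int)) := by
          rw [PySem.Int.mod_natCast]
          congr 1
          simp [Nat.mod_eq_of_lt hj, Nat.mul_comm]
        have hdiv : PySem.Int.floordiv ((i * G + j : Nat) : Int) (G : Int) = ((i : Int)) := by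
          rw [PySem.Int.floordiv_natCast]
          congr 1
          rw [Nat.mul_comm, Nat.mul_add_div hG0, Nat.div_eq_of_lt hj, Nat.add_zero]
        rw [hmod, hdiv]

-- ===== VERDICT (by name: the statement is the Claim_ definition above) =====
theorem cell_labels_py_spec : Claim_equal_cell_labels_py := by
  intro gc gr _
  unfold Spec_cell_labels_py
  exact cell_labels_py_eq gc gr
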